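-- pv_equiv track=rewrite | github.com/gnor99/szakdolgozat | progi.py | semanticfieldsearcher
-- ===== SOURCE A (Python) =====
-- def semanticfieldsearcher(lista, szotar2):
--     legnepszerubb = []
--     for szotar1 in lista:
--         tema_szavak = {}
--         for tema, szavak in szotar2.items():
--             szavak_osszesen = sum([szotar1.get(szo, 0) for szo in szavak])
--             tema_szavak[tema] = szavak_osszesen
--         legnagyobb = max(tema_szavak, key=tema_szavak.get)
--         legnepszerubb.append(legnagyobb)
--     return legnepszerubb
-- ===== SOURCE B (Python) =====
-- def semanticfieldsearcher(lista, szotar2):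
--     items = list(szotar2.items())
--     n = len(items)
--     index = {}
--     for j, (_, szavak) in enumerate(items):
--         for szo in szavak:
--             index.setdefault(szo, []).append(j)
--     legnepszerubb = []
--     for szotar1 in lista:
--         scores = [0] * n
--         for szo, c in szotar1.items():
--             if szo in index:
--                 for j in index[szo]:
--                     scores[j] += c
--         best = 0
--         for j in range(1, n):
--             if scores[j] > scores[best]:
--                 best = j
--         legnepszerubb.append(items[best][0])
--     return legnepszerubb
-- ===== Notes on version B (the rewrite author's own statement) =====
-- stated objective: faster
-- what changed: Instead of re-scanning every theme's whole word list for every input dict, B builds a word-to-theme-positions inverted index once, then for each dict accumulates per-theme scores by scanning only the dict's own keys and picks the first maximal theme by an index loop.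
-- outside the precondition, e.g. on semanticfieldsearcher([{}], {}): A raises ValueError, B raises IndexError
import Mathlib
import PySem

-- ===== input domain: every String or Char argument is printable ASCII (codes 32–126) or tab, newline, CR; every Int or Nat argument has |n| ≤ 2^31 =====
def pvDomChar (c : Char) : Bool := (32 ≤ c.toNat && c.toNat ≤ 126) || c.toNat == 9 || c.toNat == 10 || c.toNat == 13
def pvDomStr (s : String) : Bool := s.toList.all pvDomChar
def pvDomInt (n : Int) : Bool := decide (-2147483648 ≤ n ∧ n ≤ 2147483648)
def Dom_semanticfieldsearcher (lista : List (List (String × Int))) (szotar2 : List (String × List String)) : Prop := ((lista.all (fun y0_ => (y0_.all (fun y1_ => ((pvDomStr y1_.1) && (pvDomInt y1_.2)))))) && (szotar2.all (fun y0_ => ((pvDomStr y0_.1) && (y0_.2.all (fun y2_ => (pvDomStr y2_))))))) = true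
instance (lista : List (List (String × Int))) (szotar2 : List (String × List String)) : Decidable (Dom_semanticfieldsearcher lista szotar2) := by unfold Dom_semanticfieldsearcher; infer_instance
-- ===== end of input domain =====

-- B replaces A's per-dict scan of every theme's whole word list by a word→theme-positions
-- inverted index built once, scanning only each dict's own keys (objective: faster).

-- ===== PORT A =====
-- literal transliteration of A: for each dict, build {theme ↦ sum of counts of its words},
-- then max(keys, key=dict.get) (first maximal key; `.getD ""` only totalises the
-- empty-dict case, which Pre_ excludes).
def semanticfieldsearcher (lista : List (List (String × Int))) (szotar2 : List (String × List String)) : List String :=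
  lista.foldl (fun legnepszerubb szotar1 =>
    let tema_szavak : PySem.Dict String Int :=
      szotar2.foldl (fun d ts =>
        d.insert ts.1 ((ts.2.map (fun szo => (PySem.Dict.mk szotar1).getD szo 0)).sum)) (PySem.Dict.mk [])
    let legnagyobb := (PySem.List.max? tema_szavak.keys (fun t => tema_szavak.getD t 0)).getD ""
    legnepszerubb ++ [legnagyobb]) []

-- ===== PORT B =====
-- B-side helper: the inverted index word ↦ list of theme positions (one per occurrence);
-- Source B's `index.setdefault(szo, []).append(j)` is ported step for step as
-- `insert szo (getD szo [] ++ [j])` (exact: append to the entry, creating [] first).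
def sfsIndex (szotar2 : List (String × List String)) : PySem.Dict String (List Int) :=
  (PySem.List.enumerate szotar2 0).foldl (fun idx jp =>
    jp.2.2.foldl (fun idx szo => idx.insert szo (idx.getD szo [] ++ [jp.1])) idx) (PySem.Dict.mk [])

-- literal transliteration of Source B: scores = [0]*n, add c at index[szo]'s positions for each
-- present key, then a first-argmax index loop over range(1, n).
def semanticfieldsearcher_alt (lista : List (List (String × Int))) (szotar2 : List (String × List String)) : List String :=
  let n : Int := (szotar2.length : Int)
  let index := sfsIndex szotar2
  lista.foldl (fun legnepszerubb szotar1 =>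
    let scores0 := PySem.List.pyRepeat [(0 : Int)] n
    let scores := szotar1.foldl (fun sc p =>
      if index.contains p.1 then
        (index.getD p.1 []).foldl (fun sc j => PySem.List.pySetD sc j (PySem.List.pyGetD sc j 0 + p.2)) sc
      else sc) scores0
    let best := (PySem.List.pyRange 1 n 1).foldl (fun (best : Int) j =>
      if (PySem.List.pyGetD scores j 0 : Int) > PySem.List.pyGetD scores best 0 then j else best) (0 : Int)
    legnepszerubb ++ [(PySem.List.pyGetD szotar2 best ("", [])).1]) []

-- ===== PRECONDITION & SPEC =====
-- Pre_ excludes (a) nonempty lista with empty szotar2, where A's max raises ValueError, and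
-- (b) association lists with duplicate keys (in szotar2 or in a member of lista), which do not
-- denote Python dicts at all: a Python caller cannot pass them, and first-match vs positional
-- treatment of such lists is anybody's choice.
def Pre_semanticfieldsearcher (lista : List (List (String × Int))) (szotar2 : List (String × List String)) : Prop :=
  (lista = [] ∨ szotar2 ≠ []) ∧ (szotar2.map Prod.fst).Nodup ∧ ∀ d ∈ lista, (d.map Prod.fst).Nodup
instance (lista : List (List (String × Int))) (szotar2 : List (String × List String)) : Decidable (Pre_semanticfieldsearcher lista szotar2) := by unfold Pre_semanticfieldsearcher; infer_instance

def pvWitness_semanticfieldsearcher : (List (List (String × Int))) × (List (String × List String)) :=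
  ([[("a", 2), ("b", 1)], []], [("t", ["a"]), ("u", ["b", "b"])])

def Spec_semanticfieldsearcher (lista : List (List (String × Int))) (szotar2 : List (String × List String)) (out : List String) : Prop := out = semanticfieldsearcher_alt lista szotar2
instance (lista : List (List (String × Int))) (szotar2 : List (String × List String)) (out : List String) : Decidable (Spec_semanticfieldsearcher lista szotar2 out) := by unfold Spec_semanticfieldsearcher; infer_instance

-- ===== CLAIM (what is proved, stated in full; the proofs are below) =====
def Claim_equal_semanticfieldsearcher : Prop := ∀ (lista : List (List (String × Int))) (szotar2 : List (String × List String)), Dom_semanticfieldsearcher lista szotar2 → Pre_semanticfieldsearcher lista szotar2 → Spec_semanticfieldsearcher lista szotar2 (semanticfieldsearcher lista szotar2)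

-- ===== LEMMAS AND PROOFS =====

-- proof-side abbreviations
def sfsLookupSum (s1 : List (String × Int)) (x : String) : Int :=
  (s1.map (fun p => if p.1 = x then p.2 else 0)).sum

def sfsS (s1 : List (String × Int)) (ws : List String) : Int :=
  (ws.map (fun szo => (PySem.Dict.mk s1).getD szo 0)).sum

def sfsOcc (szotar2 : List (String × List String)) (x : String) : List Int :=
  (PySem.List.enumerate szotar2 0).flatMap (fun jp => List.replicate (jp.2.2.count x) jp.1)


-- occurrence list of word x in themes ps, positions starting at s
def sfsOccFrom (ps : List (String × List String)) (s : Int) (x : String) : List Int :=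
  (PySem.List.enumerate ps s).flatMap (fun jp => List.replicate (jp.2.2.count x) jp.1)

theorem sfsOccFrom_cons (p : String × List String) (ps : List (String × List String)) (s : Int) (x : String) :
    sfsOccFrom (p :: ps) s x = List.replicate (p.2.count x) s ++ sfsOccFrom ps (s + 1) x := by
  simp [sfsOccFrom, PySem.List.enumerate_cons]

theorem sfsOcc_eq (szotar2 : List (String × List String)) (x : String) :
    sfsOcc szotar2 x = sfsOccFrom szotar2 0 x := rfl

-- L0
theorem sfsLookupSum_of_not_mem (s1 : List (String × Int)) (x : String)
    (h : x ∉ s1.map Prod.fst) : sfsLookupSum s1 x = 0 := by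
  induction s1 with
  | nil => rfl
  | cons p t ih =>
    simp only [List.map_cons, List.mem_cons, not_or] at h
    have hne : ¬ (p.1 = x) := fun hc => h.1 hc.symm
    simp only [sfsLookupSum, List.map_cons, List.sum_cons, if_neg hne]
    simpa [sfsLookupSum] using ih h.2

-- L1
theorem getD_mk_eq_sfsLookupSum (s1 : List (String × Int)) (x : String)
    (h : (s1.map Prod.fst).Nodup) : (PySem.Dict.mk s1).getD x 0 = sfsLookupSum s1 x := by
  induction s1 with
  | nil => rfl
  | cons p t ih =>
    obtain ⟨k, v⟩ := p
    simp only [List.map_cons, List.nodup_cons] at h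
    by_cases hx : k = x
    · have ht : x ∉ t.map Prod.fst := by rw [← hx]; exact h.1
      simp [PySem.Dict.getD, PySem.Dict.get?_mk_cons, hx, sfsLookupSum]
      simpa [sfsLookupSum] using sfsLookupSum_of_not_mem t x ht
    · have hb : (k == x) = false := beq_eq_false_iff_ne.mpr hx
      simp only [PySem.Dict.getD, PySem.Dict.get?_mk_cons, hb, Bool.false_eq_true, if_false]
      have hi := ih h.2
      simp only [PySem.Dict.getD] at hi
      rw [hi]
      simp [sfsLookupSum, hx]

-- L2: inner fold of the index builder, one theme position j over its word list
theorem sfsIndex_inner (ws : List String) (j : Int) (d : PySem.Dict String (List Int)) (x : String) :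
    ((ws.foldl (fun d szo => d.insert szo (d.getD szo [] ++ [j])) d).getD x []) =
      d.getD x [] ++ List.replicate (ws.count x) j := by
  induction ws generalizing d with
  | nil => simp
  | cons w ws ih =>
    simp only [List.foldl_cons]
    rw [ih]
    rw [PySem.Dict.getD_insert]
    by_cases hx : x = w
    · subst hx
      simp [List.count_cons, List.append_assoc, List.singleton_append, ← List.replicate_succ]
    · have : ¬ (w = x) := fun hc => hx hc.symm
      simp [hx, List.count_cons, this]

-- L3: the whole index, generalized over start position and accumulator
theorem sfsIndex_outer (ps : List (String × List String)) (s : Int)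
    (d : PySem.Dict String (List Int)) (x : String) :
    (((PySem.List.enumerate ps s).foldl (fun idx jp =>
        jp.2.2.foldl (fun idx szo => idx.insert szo (idx.getD szo [] ++ [jp.1])) idx) d).getD x []) =
      d.getD x [] ++ sfsOccFrom ps s x := by
  induction ps generalizing s d with
  | nil => simp [sfsOccFrom]
  | cons p ps ih =>
    rw [PySem.List.enumerate_cons]
    simp only [List.foldl_cons]
    rw [ih, sfsIndex_inner, sfsOccFrom_cons, List.append_assoc]

theorem sfsIndex_getD (szotar2 : List (String × List String)) (x : String) :
    (sfsIndex szotar2).getD x [] = sfsOcc szotar2 x := by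
  have := sfsIndex_outer szotar2 0 (PySem.Dict.mk []) x
  simpa [sfsIndex, sfsOcc_eq, PySem.Dict.getD] using this

-- bounds of occurrence positions
theorem sfsOccFrom_mem_bounds (ps : List (String × List String)) (s : Int) (x : String)
    (j : Int) (hj : j ∈ sfsOccFrom ps s x) : s ≤ j ∧ j < s + ps.length := by
  induction ps generalizing s with
  | nil => simp [sfsOccFrom] at hj
  | cons p ps ih =>
    rw [sfsOccFrom_cons, List.mem_append] at hj
    rcases hj with hj | hj
    · have := List.eq_of_mem_replicate hj
      subst this
      simp only [List.length_cons]
      push_cast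
      omega
    · have := ih (s + 1) hj
      simp only [List.length_cons]
      push_cast
      omega

-- L4: counting a position k inside the occurrence list gives the word count of that theme
theorem sfsOccFrom_count (ps : List (String × List String)) (s : Int) (x : String)
    (k : Nat) (hk : k < ps.length) :
    (sfsOccFrom ps s x).count (s + (k : Int)) = (ps.getD k ("", [])).2.count x := by
  induction ps generalizing s k with
  | nil => simp at hk
  | cons p ps ih =>
    rw [sfsOccFrom_cons, List.count_append]
    cases k with
    | zero =>
      have h0 : (sfsOccFrom ps (s + 1) x).count (s + ((0 : Nat) : Int)) = 0 := by
        rw [List.count_eq_zero]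
        intro hmem
        have := sfsOccFrom_mem_bounds ps (s + 1) x _ hmem
        omega
      rw [h0]
      simp [List.count_replicate]
    | succ m =>
      have hm : m < ps.length := by simpa using hk
      have h1 : (List.replicate (p.2.count x) s).count (s + ((m + 1 : Nat) : Int)) = 0 := by
        rw [List.count_eq_zero]
        intro hmem
        have := List.eq_of_mem_replicate hmem
        omega
      have h2 := ih (s + 1) m hm
      have harith : s + ((m + 1 : Nat) : Int) = (s + 1) + (m : Int) := by push_cast; ring
      rw [h1, harith, h2]
      simp

-- L5: effect of adding c at a list of (in-range) positions
theorem sfs_apply_fold (js : List Int) (c : Int) (sc : List Int)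
    (hjs : ∀ j ∈ js, 0 ≤ j ∧ j < (sc.length : Int)) :
    (js.foldl (fun sc j => PySem.List.pySetD sc j (PySem.List.pyGetD sc j 0 + c)) sc).length = sc.length ∧
    ∀ k : Nat, k < sc.length →
      (js.foldl (fun sc j => PySem.List.pySetD sc j (PySem.List.pyGetD sc j 0 + c)) sc).getD k 0 =
        sc.getD k 0 + c * (js.count (k : Int) : Int) := by
  induction js generalizing sc with
  | nil => simp
  | cons j js ih =>
    obtain ⟨hj0, hjlt⟩ := hjs j (List.mem_cons_self)
    have hlt : j.toNat < sc.length := by omega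
    simp only [List.foldl_cons]
    rw [PySem.List.pySetD_of_nonneg sc _ hj0,
      PySem.List.pyGetD_eq_getElem sc 0 hj0 hjlt]
    set sc1 := sc.set j.toNat (sc[j.toNat] + c) with hsc1
    have hlen1 : sc1.length = sc.length := by simp [hsc1]
    have hjs' : ∀ i ∈ js, 0 ≤ i ∧ i < (sc1.length : Int) := by
      intro i hi
      rw [hlen1]
      exact hjs i (List.mem_cons_of_mem _ hi)
    obtain ⟨ihlen, ihpt⟩ := ih sc1 hjs'
    refine ⟨by rw [ihlen, hlen1], ?_⟩
    intro k hk
    rw [ihpt k (by rw [hlen1]; exact hk)]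
    have hgd : sc1.getD k 0 = if j = (k : Int) then sc.getD k 0 + c else sc.getD k 0 := by
      rw [List.getD_eq_getElem?_getD, hsc1, List.getElem?_set]
      by_cases hjk : j = (k : Int)
      · have hn : j.toNat = k := by omega
        simp [hn, hk, hjk, List.getD_eq_getElem?_getD, List.getElem?_eq_getElem hk]
      · have hn : ¬ (j.toNat = k) := by omega
        simp [hn, hjk, List.getD_eq_getElem?_getD]
    rw [hgd, List.count_cons]
    by_cases hjk : j = (k : Int) <;> simp [hjk] <;> push_cast <;> ring

-- the [0]*n initial scores list
theorem sfs_pyRepeat_zero (n : Nat) : PySem.List.pyRepeat [(0 : Int)] (n : Int) = List.replicate n 0 := by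
  induction n with
  | zero => rfl
  | succ m ih =>
    simp only [PySem.List.pyRepeat] at *
    have : ((m + 1 : Nat) : Int).toNat = m + 1 := by omega
    rw [this]
    have hm : ((m : Nat) : Int).toNat = m := by omega
    rw [hm] at ih
    simp [List.replicate_succ, ih]

-- L6 auxiliary: the scores fold, pointwise, over any accumulator
theorem sfs_scores_aux (s2 : List (String × List String)) (s1 : List (String × Int))
    (sc : List Int) (hlen : sc.length = s2.length) :
    (s1.foldl (fun sc p => ((sfsIndex s2).getD p.1 []).foldl
        (fun sc j => PySem.List.pySetD sc j (PySem.List.pyGetD sc j 0 + p.2)) sc) sc).length = sc.length ∧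
    ∀ k : Nat, k < sc.length →
      (s1.foldl (fun sc p => ((sfsIndex s2).getD p.1 []).foldl
          (fun sc j => PySem.List.pySetD sc j (PySem.List.pyGetD sc j 0 + p.2)) sc) sc).getD k 0 =
        sc.getD k 0 + (s1.map (fun p => p.2 * ((sfsOcc s2 p.1).count (k : Int) : Int))).sum := by
  induction s1 generalizing sc with
  | nil => simp
  | cons p s1 ih =>
    have hjs : ∀ j ∈ (sfsIndex s2).getD p.1 [], 0 ≤ j ∧ j < (sc.length : Int) := by
      intro j hj
      rw [sfsIndex_getD, sfsOcc_eq] at hj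
      have := sfsOccFrom_mem_bounds s2 0 p.1 j hj
      omega
    obtain ⟨hl1, hp1⟩ := sfs_apply_fold ((sfsIndex s2).getD p.1 []) p.2 sc hjs
    simp only [List.foldl_cons]
    obtain ⟨ihl, ihp⟩ := ih _ (by rw [hl1, hlen])
    refine ⟨by rw [ihl, hl1], ?_⟩
    intro k hk
    rw [ihp k (by rw [hl1]; exact hk), hp1 k hk]
    rw [sfsIndex_getD]
    simp [add_assoc]

-- L7: exchange of summation
theorem sfs_exchange (s1 : List (String × Int)) (ws : List String) :
    (s1.map (fun p => p.2 * ((ws.count p.1 : Nat) : Int))).sum =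
      (ws.map (fun x => sfsLookupSum s1 x)).sum := by
  induction ws with
  | nil => simp
  | cons w ws ih =>
    have hfun : (fun p : String × Int => p.2 * (((w :: ws).count p.1 : Nat) : Int)) =
        (fun p : String × Int => p.2 * ((ws.count p.1 : Nat) : Int) + (if p.1 = w then p.2 else 0)) := by
      funext p
      rw [List.count_cons]
      by_cases h : p.1 = w
      · simp [h]; push_cast; ring
      · have h2 : ¬ w = p.1 := fun hc => h hc.symm
        simp [h, h2]
    rw [hfun, PySem.List.sum_map_add_int, ih]
    have : (s1.map (fun p => if p.1 = w then p.2 else 0)).sum = sfsLookupSum s1 w := rfl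
    rw [this, List.map_cons, List.sum_cons]
    ring

-- the per-theme score both programs compute, as B's scores entry
theorem sfs_scores_entry (s2 : List (String × List String)) (s1 : List (String × Int))
    (h1 : (s1.map Prod.fst).Nodup) (k : Nat) (hk : k < s2.length) :
    (s1.map (fun p => p.2 * ((sfsOcc s2 p.1).count (k : Int) : Int))).sum =
      sfsS s1 (s2.getD k ("", [])).2 := by
  have hcong : ∀ p ∈ s1, p.2 * ((sfsOcc s2 p.1).count (k : Int) : Int) =
      p.2 * (((s2.getD k ("", [])).2.count p.1 : Nat) : Int) := by
    intro p _
    have := sfsOccFrom_count s2 0 p.1 k hk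
    rw [sfsOcc_eq]
    rw [(by ring : (k : Int) = 0 + (k : Int)), this]
  rw [List.map_congr_left hcong, sfs_exchange]
  unfold sfsS
  apply congrArg
  apply List.map_congr_left
  intro x _
  exact (getD_mk_eq_sfsLookupSum s1 x h1).symm

-- L9: A's theme→score dict, built by inserting distinct fresh keys, is a literal dict
theorem sfs_rows_aux (s1 : List (String × Int)) :
    ∀ (ps : List (String × List String)) (acc : List (String × Int)),
    (ps.map Prod.fst).Nodup → (∀ t ∈ ps.map Prod.fst, t ∉ acc.map Prod.fst) →
    ps.foldl (fun d ts => d.insert ts.1 ((ts.2.map (fun szo => (PySem.Dict.mk s1).getD szo 0)).sum))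
        (PySem.Dict.mk acc) =
      PySem.Dict.mk (acc ++ ps.map (fun ts => (ts.1, sfsS s1 ts.2))) := by
  intro ps
  induction ps with
  | nil => intro acc _ _; simp
  | cons p ps ih =>
    intro acc hnd hfresh
    simp only [List.map_cons, List.nodup_cons] at hnd
    have hc : (PySem.Dict.mk acc).contains p.1 = false := by
      simp only [PySem.Dict.contains]
      rw [List.any_eq_false]
      intro q hq
      simp only [beq_iff_eq]
      intro hqe
      exact hfresh p.1 (by simp) (hqe ▸ List.mem_map_of_mem hq)
    simp only [List.foldl_cons]
    have hins : (PySem.Dict.mk acc).insert p.1 ((p.2.map (fun szo => (PySem.Dict.mk s1).getD szo 0)).sum) =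
        PySem.Dict.mk (acc ++ [(p.1, sfsS s1 p.2)]) := by
      simp [PySem.Dict.insert, hc, sfsS]
    rw [hins, ih (acc ++ [(p.1, sfsS s1 p.2)]) hnd.2 ?fresh]
    · simp
    case fresh =>
      intro t ht
      simp only [List.map_append, List.mem_append]
      rintro (hta | htb)
      · exact hfresh t (by simp [ht]) hta
      · simp only [List.map_cons, List.map_nil, List.mem_singleton] at htb
        exact hnd.1 (htb ▸ ht)

-- Python's max(xs, key=k) over a nonempty list as a running-max fold
theorem sfs_max_opt (key : String → Int) :
    ∀ (rest : List String) (x : String),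
    PySem.List.max? (x :: rest) key =
      some (rest.foldl (fun m y => if key m < key y then y else m) x) := by
  intro rest
  induction rest with
  | nil => intro x; rfl
  | cons y rest ih =>
    intro x
    have h1 : PySem.List.max? (x :: y :: rest) key =
        PySem.List.max? ((if key x < key y then y else x) :: rest) key := by
      simp only [PySem.List.max?, List.foldl_cons]
      by_cases hc : key x < key y <;> simp [hc]
    rw [h1, ih]
    simp only [List.foldl_cons]

-- the two argmax folds track each other through the index → key mapping
theorem sfs_argfold (t : Int → String) (key : String → Int) (v : Int → Int) :
    ∀ (js : List Int) (b : Int), (∀ j ∈ b :: js, key (t j) = v j) →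
    (js.map t).foldl (fun m y => if key m < key y then y else m) (t b) =
      t (js.foldl (fun best j => if v best < v j then j else best) b) := by
  intro js
  induction js with
  | nil => intro b _; rfl
  | cons j js ih =>
    intro b hkv
    have hb := hkv b (by simp)
    have hj := hkv j (by simp)
    simp only [List.map_cons, List.foldl_cons, hb, hj]
    by_cases hc : v b < v j
    · simp only [if_pos hc]
      exact ih j (fun i hi => hkv i (by simp only [List.mem_cons] at hi ⊢; tauto))
    · simp only [if_neg hc]
      exact ih b (fun i hi => hkv i (by simp only [List.mem_cons] at hi ⊢; tauto))

-- the per-dict values of the two ports, as standalone functions (defeq to the fold bodies)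
def sfsA (s2 : List (String × List String)) (s1 : List (String × Int)) : String :=
  let tema_szavak : PySem.Dict String Int :=
    s2.foldl (fun d ts =>
      d.insert ts.1 ((ts.2.map (fun szo => (PySem.Dict.mk s1).getD szo 0)).sum)) (PySem.Dict.mk [])
  (PySem.List.max? tema_szavak.keys (fun t => tema_szavak.getD t 0)).getD ""

def sfsB (s2 : List (String × List String)) (s1 : List (String × Int)) : String :=
  let n : Int := (s2.length : Int)
  let index := sfsIndex s2
  let scores0 := PySem.List.pyRepeat [(0 : Int)] n
  let scores := s1.foldl (fun sc p =>
    if index.contains p.1 then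
      (index.getD p.1 []).foldl (fun sc j => PySem.List.pySetD sc j (PySem.List.pyGetD sc j 0 + p.2)) sc
    else sc) scores0
  let best := (PySem.List.pyRange 1 n 1).foldl (fun (best : Int) j =>
    if (PySem.List.pyGetD scores j 0 : Int) > PySem.List.pyGetD scores best 0 then j else best) (0 : Int)
  (PySem.List.pyGetD s2 best ("", [])).1

-- the heart of the equivalence: on one dict, A's dict-and-max equals B's inverted-index argmax
theorem sfs_pick (s2 : List (String × List String)) (s1 : List (String × Int))
    (hnd2 : (s2.map Prod.fst).Nodup) (hnd1 : (s1.map Prod.fst).Nodup) (hne : s2 ≠ []) :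
    sfsA s2 s1 = sfsB s2 s1 := by
  have hn0 : 0 < s2.length := List.length_pos_iff.mpr hne
  -- A side: the theme→score dict is literal
  have hrows := sfs_rows_aux s1 s2 [] hnd2 (by simp)
  rw [List.nil_append] at hrows
  set rows : PySem.Dict String Int :=
    s2.foldl (fun d ts =>
      d.insert ts.1 ((ts.2.map (fun szo => (PySem.Dict.mk s1).getD szo 0)).sum)) (PySem.Dict.mk [])
    with hrowsdef
  have hkeys : rows.keys = s2.map Prod.fst := by
    rw [hrows]
    simp [PySem.Dict.keys]
  have hkeynd : rows.keys.Nodup := by rw [hkeys]; exact hnd2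
  have hkey : ∀ k : Nat, k < s2.length →
      rows.getD (s2.getD k ("", [])).1 0 = sfsS s1 (s2.getD k ("", [])).2 := by
    intro k hk
    apply PySem.Dict.getD_of_mem_items rows _ hkeynd
    rw [hrows]
    have hmem : s2.getD k ("", []) ∈ s2 := by
      rw [List.getD_eq_getElem s2 _ hk]
      exact List.getElem_mem hk
    exact List.mem_map_of_mem hmem
  -- B side: scores
  set scores : List Int := s1.foldl (fun sc p =>
    if (sfsIndex s2).contains p.1 then
      ((sfsIndex s2).getD p.1 []).foldl (fun sc j => PySem.List.pySetD sc j (PySem.List.pyGetD sc j 0 + p.2)) sc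
    else sc) (PySem.List.pyRepeat [(0 : Int)] (s2.length : Int)) with hscdef
  have hstep : scores = s1.foldl (fun sc p =>
      ((sfsIndex s2).getD p.1 []).foldl (fun sc j => PySem.List.pySetD sc j (PySem.List.pyGetD sc j 0 + p.2)) sc)
      (List.replicate s2.length 0) := by
    rw [hscdef, sfs_pyRepeat_zero]
    congr 1
    funext sc p
    by_cases hc : (sfsIndex s2).contains p.1
    · simp [hc]
    · rw [if_neg (by simp [hc])]
      rw [PySem.Dict.getD_of_not_contains _ _ (by simpa using hc)]
      rfl
  obtain ⟨hslen, hspt⟩ := sfs_scores_aux s2 s1 (List.replicate s2.length 0) (by simp)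
  have hslen' : scores.length = s2.length := by
    rw [hstep, hslen]; simp
  have hval : ∀ k : Nat, k < s2.length →
      scores.getD k 0 = sfsS s1 (s2.getD k ("", [])).2 := by
    intro k hk
    rw [hstep, hspt k (by simpa using hk)]
    rw [sfs_scores_entry s2 s1 hnd1 k hk]
    simp
  -- the index → key/value dictionary used by both argmax folds
  set t : Int → String := fun j => (PySem.List.pyGetD s2 j ("", [])).1 with htdef
  set v : Int → Int := fun j => PySem.List.pyGetD scores j 0 with hvdef
  have hv : ∀ j : Int, 0 ≤ j → j < (s2.length : Int) → rows.getD (t j) 0 = v j := by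
    intro j h0 hlt
    have hjn : j.toNat < s2.length := by omega
    rw [htdef, hvdef]
    simp only []
    rw [PySem.List.pyGetD_of_nonneg s2 _ h0, PySem.List.pyGetD_of_nonneg scores _ h0]
    rw [hkey j.toNat hjn, hval j.toNat hjn]
  have hmap : s2.map Prod.fst = (PySem.List.pyRange 0 (s2.length : Int) 1).map t := by
    conv_lhs => rw [← PySem.List.map_pyGetD_pyRange_zero s2 ("", [])]
    rw [List.map_map]
    simp [PySem.List.len_eq, htdef, Function.comp]
  have hN : (0 : Int) < (s2.length : Int) := by exact_mod_cast hn0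
  rw [PySem.List.pyRange_one_cons hN, zero_add, List.map_cons] at hmap
  -- assemble
  show (PySem.List.max? rows.keys (fun x => rows.getD x 0)).getD "" = t ((PySem.List.pyRange 1 (s2.length : Int) 1).foldl (fun (best : Int) j => if v best < v j then j else best) (0 : Int))
  rw [hkeys, hmap, sfs_max_opt]
  rw [Option.getD_some]
  apply sfs_argfold t (fun x => rows.getD x 0) v
  intro j hj
  rcases List.mem_cons.mp hj with hj0 | hjm
  · subst hj0; exact hv 0 le_rfl hN
  · have := PySem.List.mem_pyRange_one.mp hjm
    exact hv j (by omega) (by omega)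

-- ===== VERDICT (by name: the statement is the Claim_ definition above) =====
theorem semanticfieldsearcher_spec : Claim_equal_semanticfieldsearcher := by
  intro lista szotar2 _ hpre
  obtain ⟨hemp, hnd2, hnd1⟩ := hpre
  unfold Spec_semanticfieldsearcher
  have hA : semanticfieldsearcher lista szotar2 = lista.map (fun s1 => sfsA szotar2 s1) := by
    show List.foldl (fun acc s1 => acc ++ [sfsA szotar2 s1]) [] lista = _
    rw [PySem.List.foldl_append_singleton_eq_map, List.nil_append]
  have hB : semanticfieldsearcher_alt lista szotar2 = lista.map (fun s1 => sfsB szotar2 s1) := by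
    show List.foldl (fun acc s1 => acc ++ [sfsB szotar2 s1]) [] lista = _
    rw [PySem.List.foldl_append_singleton_eq_map, List.nil_append]
  rw [hA, hB]
  apply List.map_congr_left
  intro s1 hs1
  have hne : szotar2 ≠ [] := by
    rcases hemp with h | h
    · subst h; simp at hs1
    · exact h
  exact sfs_pick szotar2 s1 hnd2 (hnd1 s1 hs1) hne
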